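-- pv_equiv track=rewrite | github.com/dengguojie/vue-element-admin | auto_schedule/python/tbe/dsl/unify_schedule/vector/norm/norm_schedule.py | _reorder_reduce_last_shape
-- ===== SOURCE A (Python) =====
-- def _reorder_reduce_last_shape(shape_before_reduce, reduce_axis_index):
--     ori_to_reorder_axis_map = {}
--     reorder_to_ori_axis_map = {}
--     reordered_shape = []
--     temp_axis = 0
--     for i, ele in enumerate(shape_before_reduce):
--         if i not in reduce_axis_index:
--             reordered_shape.append(ele)
--             reorder_to_ori_axis_map[temp_axis] = i
--             ori_to_reorder_axis_map[i] = temp_axis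
--             temp_axis += 1
--
--     for i, ele in enumerate(shape_before_reduce):
--         if i in reduce_axis_index:
--             reordered_shape.append(ele)
--             reorder_to_ori_axis_map[temp_axis] = i
--             ori_to_reorder_axis_map[i] = temp_axis
--             temp_axis += 1
--
--     return reordered_shape, reorder_to_ori_axis_map, ori_to_reorder_axis_map
-- ===== SOURCE B (Python) =====
-- def _reorder_reduce_last_shape(shape_before_reduce, reduce_axis_index):
--     n = len(shape_before_reduce)
--     # stable strategy via an injective integer key: reduce axes are offset past all
--     # non-reduce axes, so one sort yields the whole reorder permutation up front
--     order = sorted(range(n), key=lambda i: i + n if i in reduce_axis_index else i)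
--     reordered_shape = [shape_before_reduce[i] for i in order]
--     reorder_to_ori_axis_map = dict(enumerate(order))
--     ori_to_reorder_axis_map = {ori: new for new, ori in enumerate(order)}
--     return reordered_shape, reorder_to_ori_axis_map, ori_to_reorder_axis_map
-- ===== Notes on version B (the rewrite author's own statement) =====
-- stated objective: idiomatic
-- what changed: Replaces A's two filtering passes with mutable dict/counter state by computing the whole reorder permutation up front as one stable sort of the axis indices (reduce axes keyed past non-reduce axes), then deriving the reordered shape and both index maps directly from that permutation with enumerate.
import Mathlib
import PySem

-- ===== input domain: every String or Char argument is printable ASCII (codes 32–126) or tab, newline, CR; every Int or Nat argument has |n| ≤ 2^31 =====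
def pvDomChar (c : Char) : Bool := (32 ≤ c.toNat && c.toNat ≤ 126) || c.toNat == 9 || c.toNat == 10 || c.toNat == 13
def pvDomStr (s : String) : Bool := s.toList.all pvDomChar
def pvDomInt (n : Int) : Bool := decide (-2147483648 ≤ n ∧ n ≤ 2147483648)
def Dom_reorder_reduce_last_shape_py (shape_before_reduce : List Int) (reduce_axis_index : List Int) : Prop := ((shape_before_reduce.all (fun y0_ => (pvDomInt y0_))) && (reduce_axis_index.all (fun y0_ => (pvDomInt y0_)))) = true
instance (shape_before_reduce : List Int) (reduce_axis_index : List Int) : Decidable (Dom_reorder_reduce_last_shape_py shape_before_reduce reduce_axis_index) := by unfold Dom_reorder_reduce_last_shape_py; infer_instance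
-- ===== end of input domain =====

-- B replaces A's two filtering passes by one stable sort that yields the reorder
-- permutation up front, then reads shape and both maps off that permutation (idiomatic).

-- ===== PORT A =====
-- literal port of A: two passes over enumerate(shape), appending to the reordered
-- shape and inserting into the two dicts with a running temp_axis counter
def reorder_reduce_last_shape_py (shape_before_reduce : List Int) (reduce_axis_index : List Int) :
    List Int × (List (Int × Int)) × (List (Int × Int)) :=
  let s1 := (PySem.List.enumerate shape_before_reduce 0).foldl
    (fun (st : List Int × PySem.Dict Int Int × PySem.Dict Int Int × Int) p =>
      if !(reduce_axis_index.contains p.1) then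
        (st.1 ++ [p.2], st.2.1.insert st.2.2.2 p.1, st.2.2.1.insert p.1 st.2.2.2, st.2.2.2 + 1)
      else st)
    ([], PySem.Dict.empty, PySem.Dict.empty, 0)
  let s2 := (PySem.List.enumerate shape_before_reduce 0).foldl
    (fun (st : List Int × PySem.Dict Int Int × PySem.Dict Int Int × Int) p =>
      if reduce_axis_index.contains p.1 then
        (st.1 ++ [p.2], st.2.1.insert st.2.2.2 p.1, st.2.2.1.insert p.1 st.2.2.2, st.2.2.2 + 1)
      else st)
    s1
  (s2.1, s2.2.1.items, s2.2.2.1.items)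

-- ===== PORT B =====
-- literal port of Source B: sort the indices by the injective key, then map/enumerate
def reorder_reduce_last_shape_py_alt (shape_before_reduce : List Int) (reduce_axis_index : List Int) :
    List Int × (List (Int × Int)) × (List (Int × Int)) :=
  let n : Int := PySem.List.len shape_before_reduce
  let order := PySem.List.sorted (PySem.List.pyRange 0 n 1)
    (fun i => if reduce_axis_index.contains i then i + n else i)
  let reordered_shape := order.map (fun i => PySem.List.pyGetD shape_before_reduce i 0)
  let reorder_to_ori_axis_map := PySem.Dict.ofList (PySem.List.enumerate order 0)
  let ori_to_reorder_axis_map := PySem.Dict.ofList ((PySem.List.enumerate order 0).map (fun p => (p.2, p.1)))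
  (reordered_shape, reorder_to_ori_axis_map.items, ori_to_reorder_axis_map.items)

-- ===== PRECONDITION & SPEC =====
def Spec_reorder_reduce_last_shape_py (shape_before_reduce : List Int) (reduce_axis_index : List Int) (out : List Int × (List (Int × Int)) × (List (Int × Int))) : Prop := out = reorder_reduce_last_shape_py_alt shape_before_reduce reduce_axis_index
instance (shape_before_reduce : List Int) (reduce_axis_index : List Int) (out : List Int × (List (Int × Int)) × (List (Int × Int))) : Decidable (Spec_reorder_reduce_last_shape_py shape_before_reduce reduce_axis_index out) := by unfold Spec_reorder_reduce_last_shape_py; infer_instance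

-- ===== CLAIM (what is proved, stated in full; the proofs are below) =====
def Claim_equal_reorder_reduce_last_shape_py : Prop := ∀ (shape_before_reduce : List Int) (reduce_axis_index : List Int), Dom_reorder_reduce_last_shape_py shape_before_reduce reduce_axis_index → Spec_reorder_reduce_last_shape_py shape_before_reduce reduce_axis_index (reorder_reduce_last_shape_py shape_before_reduce reduce_axis_index)

-- ===== LEMMAS AND PROOFS =====

theorem pvUpdateItems (d : PySem.Dict Int Int) (l : List (Int × Int))
    (hf : ∀ p ∈ l, p.1 ∉ d.keys) (h : (l.map Prod.fst).Nodup) :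
    (d.update l).items = d.items ++ l := by
  induction l generalizing d with
  | nil => simp [PySem.Dict.update]
  | cons p rest ih =>
    simp only [List.map_cons, List.nodup_cons] at h
    have hc : d.contains p.1 = false := by
      by_contra hcon
      exact hf p (List.mem_cons_self)
        ((PySem.Dict.contains_iff_mem_keys d p.1).mp (by simpa using hcon))
    have hkeys := PySem.Dict.keys_insert_of_not_contains d p.2 hc
    have hitems := PySem.Dict.items_insert_of_not_contains d p.2 hc
    have step : d.update (p :: rest) = (d.insert p.1 p.2).update rest := rfl
    rw [step, ih (d.insert p.1 p.2) ?_ h.2]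
    · rw [hitems]; simp
    · intro q hq hmem
      rw [hkeys] at hmem
      rcases List.mem_append.mp hmem with hl | hl
      · exact hf q (List.mem_cons_of_mem _ hq) hl
      · have hq1 : q.1 = p.1 := by simpa using hl
        exact h.1 (hq1 ▸ List.mem_map_of_mem hq)

theorem pvOfListItems (l : List (Int × Int)) (h : (l.map Prod.fst).Nodup) :
    (PySem.Dict.ofList l).items = l := by
  have := pvUpdateItems PySem.Dict.empty l (by simp [PySem.Dict.keys_empty]) h
  simpa [PySem.Dict.ofList, PySem.Dict.empty] using this

theorem pvSortedChar (red : List Int) (n : Int) :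
    PySem.List.sorted (PySem.List.pyRange 0 n 1)
      (fun i => if red.contains i then i + n else i)
    = (PySem.List.pyRange 0 n 1).filter (fun i => !(red.contains i))
      ++ (PySem.List.pyRange 0 n 1).filter (fun i => red.contains i) := by
  apply PySem.List.sorted_eq_of_perm_of_pairwise_lt
  · have hperm := List.filter_append_perm (fun i => !(red.contains i)) (PySem.List.pyRange 0 n 1)
    simpa using hperm
  · have hp := PySem.List.pairwise_lt_pyRange_one 0 n
    rw [List.pairwise_append]
    refine ⟨?_, ?_, ?_⟩
    · apply (hp.filter (fun i => !(red.contains i))).imp_of_mem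
      intro a b ha hb hab
      have ha' : red.contains a = false := by simpa using List.of_mem_filter ha
      have hb' : red.contains b = false := by simpa using List.of_mem_filter hb
      simp only [ha', hb', Bool.false_eq_true, if_false]
      exact hab
    · apply (hp.filter (fun i => red.contains i)).imp_of_mem
      intro a b ha hb hab
      have ha' : red.contains a = true := by simpa using List.of_mem_filter ha
      have hb' : red.contains b = true := by simpa using List.of_mem_filter hb
      simp only [ha', hb', if_true]
      omega
    · intro a ha b hb
      have ha' : red.contains a = false := by simpa using List.of_mem_filter ha
      have hb' : red.contains b = true := by simpa using List.of_mem_filter hb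
      have ham := PySem.List.mem_pyRange_one.mp (List.mem_of_mem_filter ha)
      have hbm := PySem.List.mem_pyRange_one.mp (List.mem_of_mem_filter hb)
      simp only [ha', hb', Bool.false_eq_true, if_false, if_true]
      omega

theorem pvFoldChar (c : Int → Bool) (ps : List (Int × Int)) (rs : List Int)
    (d1 d2 : PySem.Dict Int Int) (t : Int)
    (h1 : ∀ k ∈ d1.keys, k < t)
    (h2 : ∀ p ∈ ps, c p.1 = true → p.1 ∉ d2.keys)
    (h3 : (ps.map Prod.fst).Nodup) :
    ps.foldl
      (fun (st : List Int × PySem.Dict Int Int × PySem.Dict Int Int × Int) p =>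
        if c p.1 then
          (st.1 ++ [p.2], st.2.1.insert st.2.2.2 p.1, st.2.2.1.insert p.1 st.2.2.2, st.2.2.2 + 1)
        else st)
      (rs, d1, d2, t)
    = (rs ++ (ps.filter (fun p => c p.1)).map Prod.snd,
       PySem.Dict.mk (d1.items ++ PySem.List.enumerate ((ps.filter (fun p => c p.1)).map Prod.fst) t),
       PySem.Dict.mk (d2.items ++ (PySem.List.enumerate ((ps.filter (fun p => c p.1)).map Prod.fst) t).map (fun q => (q.2, q.1))),
       t + ((ps.filter (fun p => c p.1)).length : Int)) := by
  induction ps generalizing rs d1 d2 t with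
  | nil => simp
  | cons p rest ih =>
    simp only [List.map_cons, List.nodup_cons] at h3
    by_cases hc : c p.1 = true
    · have hc1 : d1.contains t = false := by
        by_contra hcon
        have := h1 t ((PySem.Dict.contains_iff_mem_keys d1 t).mp (by simpa using hcon))
        omega
      have hc2 : d2.contains p.1 = false := by
        by_contra hcon
        exact h2 p List.mem_cons_self hc
          ((PySem.Dict.contains_iff_mem_keys d2 p.1).mp (by simpa using hcon))
      have hi1 := PySem.Dict.items_insert_of_not_contains d1 (v := p.1) hc1
      have hk1 := PySem.Dict.keys_insert_of_not_contains d1 (v := p.1) hc1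
      have hi2 := PySem.Dict.items_insert_of_not_contains d2 (v := t) hc2
      have hk2 := PySem.Dict.keys_insert_of_not_contains d2 (v := t) hc2
      rw [List.foldl_cons]
      simp only [hc, if_true]
      rw [ih (rs ++ [p.2]) (d1.insert t p.1) (d2.insert p.1 t) (t + 1) ?_ ?_ h3.2]
      · simp only [List.filter_cons, hc, if_true, List.map_cons, PySem.List.enumerate_cons,
          hi1, hi2, List.length_cons]
        refine Prod.ext (by simp) (Prod.ext ?_ (Prod.ext ?_ (by push_cast; ring)))
        · simp
        · simp
      · intro k hk
        rw [hk1] at hk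
        rcases List.mem_append.mp hk with hl | hl
        · have := h1 k hl; omega
        · simp only [List.mem_singleton] at hl; omega
      · intro q hq hcq hmem
        rw [hk2] at hmem
        rcases List.mem_append.mp hmem with hl | hl
        · exact h2 q (List.mem_cons_of_mem _ hq) hcq hl
        · have : q.1 = p.1 := by simpa using hl
          exact h3.1 (this ▸ List.mem_map_of_mem hq)
    · have hc' : c p.1 = false := by simpa using hc
      rw [List.foldl_cons]
      simp only [hc', Bool.false_eq_true, if_false]
      rw [ih rs d1 d2 t h1 (fun q hq => h2 q (List.mem_cons_of_mem _ hq)) h3.2]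
      simp [hc']

-- ===== VERDICT (by name: the statement is the Claim_ definition above) =====
theorem reorder_reduce_last_shape_py_spec : Claim_equal_reorder_reduce_last_shape_py := by
  intro shape red _
  unfold Spec_reorder_reduce_last_shape_py
  dsimp only [reorder_reduce_last_shape_py, reorder_reduce_last_shape_py_alt]
  have h3 : ((PySem.List.enumerate shape 0).map Prod.fst).Nodup := by
    rw [PySem.List.map_fst_enumerate]
    exact PySem.List.nodup_pyRange_one _ _
  rw [pvFoldChar (fun i => !(red.contains i)) (PySem.List.enumerate shape 0) [] PySem.Dict.empty
    PySem.Dict.empty 0 (by simp [PySem.Dict.keys_empty]) (by simp [PySem.Dict.keys_empty]) h3]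
  rw [pvFoldChar (fun i => red.contains i) (PySem.List.enumerate shape 0) _ _ _ _ ?h1 ?h2 h3]
  case h1 =>
    intro k hk
    simp only [PySem.Dict.keys_mk] at hk
    rw [show (PySem.Dict.empty : PySem.Dict Int Int).items = [] from rfl] at hk
    rw [List.nil_append, PySem.List.map_fst_enumerate] at hk
    simpa using (PySem.List.mem_pyRange_one.mp hk).2
  case h2 =>
    intro p hp hcp hmem
    simp only [PySem.Dict.keys_mk] at hmem
    rw [show (PySem.Dict.empty : PySem.Dict Int Int).items = [] from rfl] at hmem
    simp only [List.nil_append, List.map_map] at hmem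
    have hmem2 : p.1 ∈ List.map (fun x : Int × Int => x.2) (PySem.List.enumerate
        (List.map Prod.fst (List.filter (fun p => !red.contains p.1)
          (PySem.List.enumerate shape)))) := hmem
    rw [PySem.List.map_snd_enumerate] at hmem2
    have hmem' := hmem2
    obtain ⟨q, hq, hq1⟩ := List.mem_map.mp hmem'
    have := List.of_mem_filter hq
    rw [hq1] at this
    simp only [Bool.not_eq_true'] at this
    have hcp' : red.contains p.1 = true := hcp
    rw [this] at hcp'
    exact Bool.false_ne_true hcp'
  rw [pvSortedChar red (PySem.List.len shape)]
  have hsel1 : List.filter (fun p => !red.contains p.1) (PySem.List.enumerate shape)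
      = ((PySem.List.pyRange 0 (PySem.List.len shape) 1).filter (fun i => !(red.contains i))).map
          (fun j => (j, PySem.List.pyGetD shape j 0)) := by
    rw [PySem.List.enumerate_eq_map_pyRange shape 0, List.filter_map]
    rfl
  have hsel2 : List.filter (fun p => red.contains p.1) (PySem.List.enumerate shape)
      = ((PySem.List.pyRange 0 (PySem.List.len shape) 1).filter (fun i => red.contains i)).map
          (fun j => (j, PySem.List.pyGetD shape j 0)) := by
    rw [PySem.List.enumerate_eq_map_pyRange shape 0, List.filter_map]
    rfl
  rw [hsel1, hsel2]
  set F1 := (PySem.List.pyRange 0 (PySem.List.len shape) 1).filter (fun i => !(red.contains i)) with hF1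
  set F2 := (PySem.List.pyRange 0 (PySem.List.len shape) 1).filter (fun i => red.contains i) with hF2
  have hndF : (F1 ++ F2).Nodup := by
    have hperm : (F1 ++ F2).Perm (PySem.List.pyRange 0 (PySem.List.len shape) 1) := by
      simpa [hF1, hF2, Bool.not_not] using
        List.filter_append_perm (fun i => !(red.contains i))
          (PySem.List.pyRange 0 (PySem.List.len shape) 1)
    exact hperm.nodup_iff.mpr (PySem.List.nodup_pyRange_one _ _)
  have hof1 := pvOfListItems (PySem.List.enumerate (F1 ++ F2)) (by
    rw [PySem.List.map_fst_enumerate]; exact PySem.List.nodup_pyRange_one _ _)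
  have hof2 := pvOfListItems ((PySem.List.enumerate (F1 ++ F2)).map (fun p => (p.2, p.1))) (by
    simp only [List.map_map]
    have heq : (Prod.fst ∘ fun p : Int × Int => (p.2, p.1)) = fun p : Int × Int => p.2 := rfl
    rw [heq, PySem.List.map_snd_enumerate]
    exact hndF)
  rw [hof1, hof2, PySem.List.enumerate_append]
  simp [List.map_map, Function.comp_def, PySem.Dict.empty]
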